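-- pv_equiv track=rewrite | github.com/EMattfolk/Advent-of-code | day08.py | traverse1
-- ===== SOURCE A (Python) =====
-- def traverse1 (l):
--     length = 0
--     score = 0
--     if l[0] == 0:
--         return sum(l[2:2+l[1]]), 2 + l[1]
--
--     for i in range(l[0]):
--         res = traverse1(l[2+length:])
--         score += res[0]
--         length += res[1]
--
--     return score + sum(l[2+length:2+length+l[1]]), 2 + length + l[1]
-- ===== SOURCE B (Python) =====
-- def traverse1(l):
--     total = 0
--     i = 0
--     stack = [(1, 0)]
--     while stack:
--         c, m = stack[-1]
--         if c <= 0: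
--             stack.pop()
--             total += sum(l[i:i+m])
--             i += m
--         else:
--             stack[-1] = (c - 1, m)
--             stack.append((l[i], l[i+1]))
--             i += 2
--     return total, i
-- ===== Notes on version B (the rewrite author's own statement) =====
-- stated objective: alternative
-- what changed: B replaces A's recursion on sliced copies of the list (each child call receives l[2+length:]) by an iterative single left-to-right pass over the original list with an explicit stack of (children-remaining, metadata-count) frames popped when the counter runs out; same cost on shallow inputs, no recursion and no list copies.
-- outside the precondition, e.g. on traverse1([1, 1, 0, -5, -3, 2]): A returns (0, 0), B returns (-3, 0); on traverse1([3, -3, 0, -3, -1, 2]): A returns (-1, 1), B returns (0, 1)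
import Mathlib
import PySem

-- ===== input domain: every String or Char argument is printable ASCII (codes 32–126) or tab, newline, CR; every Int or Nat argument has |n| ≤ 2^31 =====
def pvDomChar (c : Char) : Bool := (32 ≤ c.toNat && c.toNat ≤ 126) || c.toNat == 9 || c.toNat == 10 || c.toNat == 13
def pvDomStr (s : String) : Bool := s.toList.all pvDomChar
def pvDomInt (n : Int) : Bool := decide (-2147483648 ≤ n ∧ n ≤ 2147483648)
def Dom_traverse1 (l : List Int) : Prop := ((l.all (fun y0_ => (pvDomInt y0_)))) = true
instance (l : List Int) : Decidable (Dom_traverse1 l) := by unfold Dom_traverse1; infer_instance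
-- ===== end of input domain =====

-- B replaces A's recursion on sliced copies of the list by an iterative explicit-stack single
-- pass over the original list (objective: alternative — no recursion and no list copies; the
-- returned value is identical).

-- ===== PORT A =====
-- A is recursive on slices; the Nat fuel argument is only a totality guard (depth ≤ length on
-- every input admitted by Pre_traverse1, so the fuel never runs out there); pyGetD's default 0
-- is only reached where Python would raise IndexError, which Pre_traverse1 excludes.
def pvTrA : Nat → List Int → Int × Int
  | 0, _ => (0, 0)
  | fuel + 1, l =>
    if PySem.List.pyGetD l 0 0 = 0 then
      ((PySem.List.slice l (some 2) (some (2 + PySem.List.pyGetD l 1 0))).sum,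
       2 + PySem.List.pyGetD l 1 0)
    else
      let st := (PySem.List.pyRange 0 (PySem.List.pyGetD l 0 0) 1).foldl
        (fun (st : Int × Int) _ =>
          let res := pvTrA fuel (PySem.List.slice l (some (2 + st.2)) none)
          (st.1 + res.1, st.2 + res.2)) (0, 0)
      (st.1 + (PySem.List.slice l (some (2 + st.2))
                 (some (2 + st.2 + PySem.List.pyGetD l 1 0))).sum,
       2 + st.2 + PySem.List.pyGetD l 1 0)

def traverse1 (l : List Int) : Int × Int := pvTrA (l.length + 1) l

-- ===== PORT B =====
-- B is an iterative while-loop over an explicit stack of (children-remaining, metadata-count)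
-- frames, a frame being popped once its child counter has run out (c ≤ 0, which also makes a negative child count mean 'no children', exactly as Python's range does in A); the Nat fuel is only a totality guard for the while loop (the pass makes at most
-- 2·length+3 iterations on every input admitted by Pre_traverse1, so the fuel never runs out
-- there); pyGetD's default 0 is only reached where Python would raise IndexError, which
-- Pre_traverse1 excludes.
def pvMach : Nat → List Int → Int → Int → List (Int × Int) → Int × Int
  | 0, _, i, total, _ => (total, i)
  | _ + 1, _, i, total, [] => (total, i)
  | f + 1, l, i, total, (c, m) :: s =>
    if c ≤ 0 then
      pvMach f l (i + m) (total + (PySem.List.slice l (some i) (some (i + m))).sum) s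
    else
      pvMach f l (i + 2) total
        ((PySem.List.pyGetD l i 0, PySem.List.pyGetD l (i + 1) 0) :: (c - 1, m) :: s)

def traverse1_alt (l : List Int) : Int × Int :=
  pvMach (2 * l.length + 3) l 0 0 [(1, 0)]

-- ===== PRECONDITION & SPEC =====
-- pvSettle/pvCheck: a single left-to-right structural pass with a stack of open nodes
-- (children still to read, metadata count); pvCheck l 0 [(k, 0)] recognises lists beginning
-- with k well-formed trees (nonnegative metadata counts, all announced entries present; a
-- negative child count is read as 'no children', as range() does).  It is structurally
-- recursive so that Pre_traverse1 evaluates by `decide`.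
def pvSettle : List (Nat × Nat) → Nat × List (Nat × Nat)
  | [] => (0, [])
  | (0, m) :: s => if m = 0 then pvSettle s else (m, s)
  | st => (0, st)

def pvCheck : List Int → Nat → List (Nat × Nat) → Bool
  | l, skip + 1, stack =>
    match l with
    | [] => false
    | _ :: t => pvCheck t skip stack
  | l, 0, stack =>
    match pvSettle stack with
    | (0, []) => true
    | (sk + 1, st) =>
      match l with
      | [] => false
      | _ :: t => pvCheck t sk st
    | (0, (c + 1, m) :: s) =>
      match l with
      | x :: y :: t =>
        if 0 ≤ y then pvCheck t 0 ((x.toNat, y.toNat) :: (c, m) :: s) else false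
      | _ => false
    | (0, (0, _) :: _) => false   -- unreachable: pvSettle never leaves a (0, _) on top

-- Pre_: l has a header (at least two entries) and the root's announced children are
-- well-formed trees (nonnegative metadata counts with all announced entries present; a
-- negative child count is read as 'no children', which is how A's range() reads it).  The
-- root's own metadata count is unconstrained: at the root A's relative slices coincide with
-- B's absolute ones.  Outside this, A may raise IndexError, recurse forever, or return an
-- accidental value produced by relative negative-index slicing of its sliced copies, which
-- B's absolute-index stack pass does not reproduce (B may raise or loop there).
def Pre_traverse1 (l : List Int) : Prop :=
  2 ≤ l.length ∧ pvCheck (l.drop 2) 0 [((l.getD 0 0).toNat, 0)] = true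
instance (l : List Int) : Decidable (Pre_traverse1 l) := by unfold Pre_traverse1; infer_instance

def pvWitness_traverse1 : List Int := [2, 3, 0, 3, 10, 11, 12, 1, 1, 0, 1, 99, 2, 1, 1, 2]

def Spec_traverse1 (l : List Int) (out : Int × Int) : Prop := out = traverse1_alt l
instance (l : List Int) (out : Int × Int) : Decidable (Spec_traverse1 l out) := by unfold Spec_traverse1; infer_instance

-- ===== CLAIM (what is proved, stated in full; the proofs are below) =====
def Claim_equal_traverse1 : Prop := ∀ (l : List Int), Dom_traverse1 l → Pre_traverse1 l → Spec_traverse1 l (traverse1 l)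

-- ===== LEMMAS AND PROOFS =====

-- Proof-side parser: pvChk k l consumes k consecutive well-formed trees from the front of l
-- and returns the remainder (with its length bound, needed for termination).
def pvChkF : (k : Nat) → (l : List Int) → Option {r : List Int // r.length ≤ l.length}
  | 0, l => some ⟨l, Nat.le_refl _⟩
  | k + 1, c :: m :: rest =>
    if 0 ≤ m then
      match pvChkF c.toNat rest with
      | none => none
      | some ⟨r, hr⟩ =>
        if m.toNat ≤ r.length then
          match pvChkF k (r.drop m.toNat) with
          | none => none
          | some ⟨r2, h2⟩ => some ⟨r2, by simp at h2 ⊢; omega⟩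
        else none
    else none
  | _ + 1, _ => none
termination_by k l => (l.length, k)
decreasing_by
  · exact Prod.Lex.left _ _ (by simp)
  · exact Prod.Lex.left _ _ (by simp; omega)

def pvChk (k : Nat) (l : List Int) : Option (List Int) := (pvChkF k l).map Subtype.val

lemma pvChk_zero (l : List Int) : pvChk 0 l = some l := by
  simp [pvChk, pvChkF]

lemma pvChk_succ_cons (k : Nat) (c m : Int) (rest : List Int) :
    pvChk (k + 1) (c :: m :: rest) =
      if 0 ≤ m then
        (pvChk c.toNat rest).bind
          (fun r => if m.toNat ≤ r.length then pvChk k (r.drop m.toNat) else none)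
      else none := by
  rw [pvChk, pvChkF]
  split_ifs with h
  · rcases h1 : pvChkF c.toNat rest with _ | ⟨r, hr⟩ <;> simp [pvChk, h1]
    split_ifs with h2
    · rcases h3 : pvChkF k (r.drop m.toNat) with _ | ⟨r2, h4⟩ <;> simp [pvChk, h3]
    · rfl
  · rfl

lemma pvChk_length {k : Nat} {l r : List Int} (h : pvChk k l = some r) :
    r.length ≤ l.length := by
  unfold pvChk at h
  rcases h1 : pvChkF k l with _ | ⟨r', hr⟩ <;> simp [h1] at h
  exact h ▸ hr

lemma pvChkF_suffix : ∀ (k : Nat) (l : List Int) (x : {r : List Int // r.length ≤ l.length}),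
    pvChkF k l = some x → x.val <:+ l := by
  intro k l
  fun_induction pvChkF k l with
  | case1 => intro x h; simp only [Option.some.injEq] at h; subst h; exact List.suffix_rfl
  | case2 => intro x h; exact absurd h (by simp)
  | case3 => intro x h; exact absurd h (by simp)
  | case4 k c m rest h1 r hr hx1 h2 r2 hr2 hx2 ih2 ih1 =>
      intro x h
      simp only [Option.some.injEq] at h
      subst h
      exact ((ih1 ⟨r2, hr2⟩ hx2).trans ((List.drop_suffix _ _).trans (ih2 ⟨r, hr⟩ hx1))).trans
        ((List.suffix_cons _ _).trans (List.suffix_cons _ _))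
  | case5 => intro x h; exact absurd h (by simp)
  | case6 => intro x h; exact absurd h (by simp)
  | case7 => intro x h; exact absurd h (by simp)

lemma pvChk_suffix {k : Nat} {l r : List Int} (h : pvChk k l = some r) : r <:+ l := by
  unfold pvChk at h
  rcases h1 : pvChkF k l with _ | ⟨r', hr⟩ <;> simp [h1] at h
  exact h ▸ pvChkF_suffix k l ⟨r', hr⟩ h1

-- completeness of the structural recognizer w.r.t. the proof-side parser pvChk
def pvConsume : List (Nat × Nat) → List Int → Option (List Int)
  | [], l => some l
  | (c, m) :: s, l =>
    (pvChk c l).bind (fun r => if m ≤ r.length then pvConsume s (r.drop m) else none)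

lemma pvSettle_consume (stack : List (Nat × Nat)) (l : List Int) :
    pvConsume stack l =
      (if (pvSettle stack).1 ≤ l.length
       then pvConsume (pvSettle stack).2 (l.drop (pvSettle stack).1) else none) := by
  induction stack generalizing l with
  | nil => simp [pvSettle, pvConsume]
  | cons p s ih =>
      obtain ⟨c, m⟩ := p
      match c, m with
      | 0, 0 => simpa [pvSettle, pvConsume, pvChk_zero] using ih l
      | 0, (m + 1) => simp [pvSettle, pvConsume, pvChk_zero]
      | (c + 1), m => simp [pvSettle, pvConsume]

lemma pvCheck_consume : ∀ (l : List Int) (skip : Nat) (stack : List (Nat × Nat)),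
    pvCheck l skip stack = true →
    skip ≤ l.length ∧ (pvConsume stack (l.drop skip)).isSome = true := by
  intro l skip stack
  fun_induction pvCheck l skip stack with
  | case1 => simp [pvCheck]
  | case2 skip stack head t ih =>
      intro h
      obtain ⟨h1, h2⟩ := ih h
      exact ⟨by simpa using Nat.succ_le_succ h1, by simpa using h2⟩
  | case3 l stack hst =>
      intro _
      refine ⟨Nat.zero_le _, ?_⟩
      rw [List.drop_zero, pvSettle_consume, hst]
      simp [pvConsume]
  | case4 => simp
  | case5 stack sk st hst head t ih =>
      intro h
      obtain ⟨h1, h2⟩ := ih h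
      refine ⟨Nat.zero_le _, ?_⟩
      rw [List.drop_zero, pvSettle_consume, hst]
      simp only [List.length_cons]
      rw [if_pos (by omega), List.drop_succ_cons]
      exact h2
  | case6 stack c m s hst x y t hxy ih =>
      intro h
      obtain ⟨-, h2⟩ := ih h
      refine ⟨Nat.zero_le _, ?_⟩
      rw [List.drop_zero, pvSettle_consume, hst]
      rw [if_pos (Nat.zero_le _), List.drop_zero]
      rw [List.drop_zero] at h2
      simp only [pvConsume] at h2 ⊢
      rcases hr : pvChk x.toNat t with _ | r
      · simp [hr] at h2
      · rw [hr] at h2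
        simp only [Option.bind_some] at h2
        by_cases hy : y.toNat ≤ r.length
        · rw [if_pos hy] at h2
          rw [Nat.succ_eq_add_one, pvChk_succ_cons, if_pos hxy, hr, Option.bind_some,
            if_pos hy]
          exact h2
        · rw [if_neg hy] at h2; simp at h2
  | case7 => simp
  | case8 => simp
  | case9 => simp

lemma pre_chk {k : Nat} {l : List Int} (h : pvCheck l 0 [(k, 0)] = true) :
    (pvChk k l).isSome = true := by
  obtain ⟨-, h2⟩ := pvCheck_consume l 0 [(k, 0)] h
  rw [List.drop_zero] at h2
  simp only [pvConsume] at h2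
  rcases hr : pvChk k l with _ | r
  · rw [hr] at h2; simp at h2
  · simp

-- generic: a fold whose function ignores the elements is an iterate
lemma foldl_const_iterate {α β : Type} (f : β → α → β) (g : β → β)
    (hfg : ∀ st a, f st a = g st) (lst : List α) (init : β) :
    lst.foldl f init = g^[lst.length] init := by
  induction lst generalizing init with
  | nil => rfl
  | cons a t ih => simp [List.foldl_cons, hfg, ih, Function.iterate_succ_apply]

lemma pvChk_succ_nil (k : Nat) : pvChk (k + 1) ([] : List Int) = none := by
  rw [pvChk, pvChkF] <;> simp

lemma pvChk_succ_single (k : Nat) (a : Int) : pvChk (k + 1) [a] = none := by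
  rw [pvChk, pvChkF] <;> simp

lemma pvChk_succ_split {k : Nat} {l r : List Int} (h : pvChk (k + 1) l = some r) :
    ∃ rm, pvChk 1 l = some rm ∧ pvChk k rm = some r := by
  match l with
  | [] => rw [pvChk_succ_nil] at h; exact absurd h (by simp)
  | [a] => rw [pvChk_succ_single] at h; exact absurd h (by simp)
  | c :: m :: rest =>
    rw [pvChk_succ_cons] at h
    by_cases hcm : 0 ≤ m
    swap
    · rw [if_neg hcm] at h; simp at h
    rw [if_pos hcm] at h
    rcases hr1 : pvChk c.toNat rest with _ | r1
    · rw [hr1] at h; simp at h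
    rw [hr1, Option.bind_some] at h
    by_cases hm : m.toNat ≤ r1.length
    swap
    · rw [if_neg hm] at h; simp at h
    rw [if_pos hm] at h
    exact ⟨r1.drop m.toNat,
      by rw [pvChk_succ_cons, if_pos hcm, hr1, Option.bind_some, if_pos hm, pvChk_zero],
      h⟩

-- index/slice bridges
lemma pvGetD_nat (L : List Int) (i : Nat) (x d : Int) (h : L[i]? = some x) :
    PySem.List.pyGetD L (i : Int) d = x := by
  rw [PySem.List.pyGetD_natCast, List.getD_eq_getElem?_getD, h]; rfl

lemma pvGetD_zero_cons' (a b d : Int) (t : List Int) :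
    PySem.List.pyGetD (a :: b :: t) 0 d = a := by
  have : ((0 : Nat) : Int) = (0 : Int) := rfl
  rw [← this, pvGetD_nat (a :: b :: t) 0 a d (by simp)]

lemma pvGetD_one_cons (a b d : Int) (t : List Int) :
    PySem.List.pyGetD (a :: b :: t) 1 d = b := by
  have : ((1 : Nat) : Int) = (1 : Int) := rfl
  rw [← this, pvGetD_nat (a :: b :: t) 1 b d (by simp)]

-- proof-side helper: an index-based recursion over the original list, used only as an
-- intermediate characterisation of A's value at an arbitrary absolute position.
def pvTrB : Nat → List Int → Int → Int × Int
  | 0, _, i => (0, i)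
  | fuel + 1, l, i =>
    let c := PySem.List.pyGetD l i 0
    let m := PySem.List.pyGetD l (i + 1) 0
    let st := (PySem.List.pyRange 0 c 1).foldl
      (fun (st : Int × Int) _ =>
        let res := pvTrB fuel l st.2
        (st.1 + res.1, res.2)) (0, i + 2)
    (st.1 + (PySem.List.slice l (some st.2) (some (st.2 + m))).sum, st.2 + m)

-- loop bodies as named step functions (definitionally the fold bodies of pvTrA/pvTrB)
def pvGA (fuel : Nat) (l : List Int) (st : Int × Int) : Int × Int :=
  let res := pvTrA fuel (PySem.List.slice l (some (2 + st.2)) none)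
  (st.1 + res.1, st.2 + res.2)

def pvGB (fuel : Nat) (L : List Int) (st : Int × Int) : Int × Int :=
  let res := pvTrB fuel L st.2
  (st.1 + res.1, res.2)

lemma pvFoldA (fuel : Nat) (l : List Int) (c : Int) (init : Int × Int) :
    (PySem.List.pyRange 0 c 1).foldl
      (fun (st : Int × Int) _ =>
        let res := pvTrA fuel (PySem.List.slice l (some (2 + st.2)) none)
        (st.1 + res.1, st.2 + res.2)) init = (pvGA fuel l)^[c.toNat] init := by
  have h := foldl_const_iterate
    (fun (st : Int × Int) (_ : Int) =>
      let res := pvTrA fuel (PySem.List.slice l (some (2 + st.2)) none)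
      (st.1 + res.1, st.2 + res.2))
    (pvGA fuel l) (fun _ _ => rfl) (PySem.List.pyRange 0 c 1) init
  rw [h, PySem.List.length_pyRange_one]
  norm_num

lemma pvFoldB (fuel : Nat) (L : List Int) (c : Int) (init : Int × Int) :
    (PySem.List.pyRange 0 c 1).foldl
      (fun (st : Int × Int) _ =>
        let res := pvTrB fuel L st.2
        (st.1 + res.1, res.2)) init = (pvGB fuel L)^[c.toNat] init := by
  have h := foldl_const_iterate
    (fun (st : Int × Int) (_ : Int) =>
      let res := pvTrB fuel L st.2
      (st.1 + res.1, res.2))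
    (pvGB fuel L) (fun _ _ => rfl) (PySem.List.pyRange 0 c 1) init
  rw [h, PySem.List.length_pyRange_one]
  norm_num

-- pvTrA at a suffix equals the index recursion, by strong induction on the suffix length
lemma pvMain (L : List Int) : ∀ (s i : Nat) (r : List Int),
    L.length - i ≤ s → pvChk 1 (L.drop i) = some r →
    ∀ (fa fb : Nat), L.length - i < fa → L.length - i < fb →
    pvTrB fb L i = ((pvTrA fa (L.drop i)).1, (i : Int) + (pvTrA fa (L.drop i)).2)
    ∧ (pvTrA fa (L.drop i)).2 = ((L.drop i).length - r.length : Nat) := by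
  intro s
  induction s with
  | zero =>
    intro i r hs hchk
    exfalso
    have h0 : L.drop i = [] := by
      have := List.length_drop (l := L) (i := i)
      exact List.eq_nil_of_length_eq_zero (by omega)
    rw [h0, pvChk_succ_nil] at hchk
    simp at hchk
  | succ s IH =>
    intro i r hs hchk fa fb hfa hfb
    -- the suffix must start with a two-element header
    rcases hl : L.drop i with _ | ⟨c, tail⟩
    · rw [hl, pvChk_succ_nil] at hchk; simp at hchk
    rcases htl : tail with _ | ⟨m, rest⟩
    · rw [hl, htl, pvChk_succ_single] at hchk; simp at hchk
    subst htl
    -- decompose the parse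
    rw [hl, pvChk_succ_cons] at hchk
    by_cases hcm : 0 ≤ m
    swap
    · rw [if_neg hcm] at hchk; simp at hchk
    rw [if_pos hcm] at hchk
    rcases hr1 : pvChk c.toNat rest with _ | r1
    · rw [hr1] at hchk; simp at hchk
    rw [hr1, Option.bind_some] at hchk
    by_cases hm : m.toNat ≤ r1.length
    swap
    · rw [if_neg hm] at hchk; simp at hchk
    rw [if_pos hm, pvChk_zero] at hchk
    have hrR : r = r1.drop m.toNat := by simpa using hchk.symm
    have hr1len : r1.length ≤ rest.length := pvChk_length hr1
    have hlenl : (L.drop i).length = L.length - i := List.length_drop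
    have hlen2 : L.length - i = rest.length + 2 := by
      rw [← hlenl, hl]; simp
    have hiL : i + 2 ≤ L.length := by
      rcases Nat.le_total i L.length with h | h
      · omega
      · exfalso; rw [List.drop_eq_nil_of_le h] at hl; simp at hl
    have hrest : L.drop (i + 2) = rest := by
      have h2 := congrArg (List.drop 2) hl
      rw [List.drop_drop] at h2
      simpa [Nat.add_comm] using h2
    obtain ⟨fa', rfl⟩ : ∃ fa', fa = fa' + 1 := ⟨fa - 1, by omega⟩
    obtain ⟨fb', rfl⟩ : ∃ fb', fb = fb' + 1 := ⟨fb - 1, by omega⟩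
    -- header reads
    have hA0 : PySem.List.pyGetD (L.drop i) 0 0 = c := by rw [hl]; exact pvGetD_zero_cons' _ _ _ _
    have hA1 : PySem.List.pyGetD (L.drop i) 1 0 = m := by rw [hl]; exact pvGetD_one_cons _ _ _ _
    have hB0 : PySem.List.pyGetD L (i : Int) 0 = c := by
      refine pvGetD_nat L i c 0 ?_
      have h0 : L[i + 0]? = some c := by rw [← List.getElem?_drop, hl]; rfl
      simpa using h0
    have hB1 : PySem.List.pyGetD L ((i : Int) + 1) 0 = m := by
      have hcast : ((i : Int) + 1) = ((i + 1 : Nat) : Int) := by push_cast; ring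
      rw [hcast]
      refine pvGetD_nat L (i + 1) m 0 ?_
      rw [← List.getElem?_drop, hl]; rfl
    -- the parallel loop invariant
    have loop : ∀ (k i' : Nat) (r' : List Int), i + 2 ≤ i' → i' ≤ L.length →
        pvChk k (L.drop i') = some r' →
        ∃ (S : Int) (N : Nat),
          i' + N ≤ L.length ∧ N = (L.length - i') - r'.length ∧ r'.length ≤ L.length - i' ∧
          ∀ (sA sB : Int),
            (pvGA fa' (L.drop i))^[k] (sA, ((i' - (i + 2) : Nat) : Int))
              = (sA + S, ((i' + N - (i + 2) : Nat) : Int))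
            ∧ (pvGB fb' L)^[k] (sB, (i' : Int)) = (sB + S, ((i' + N : Nat) : Int)) := by
      intro k
      induction k with
      | zero =>
        intro i' r' hge hle hc0
        rw [pvChk_zero] at hc0
        obtain rfl : L.drop i' = r' := Option.some.inj hc0
        refine ⟨0, 0, by omega, by simp, by simp, ?_⟩
        intro sA sB
        constructor <;> simp [Prod.ext_iff]
      | succ k ihk =>
        intro i' r' hge hle hck
        obtain ⟨rm, hrm1, hrmk⟩ := pvChk_succ_split hck
        have hrmlen : rm.length ≤ L.length - i' := by
          have h := pvChk_length hrm1
          rw [List.length_drop] at h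
          exact h
        obtain ⟨pre, hpre⟩ := pvChk_suffix hrm1
        have hprelen : pre.length = (L.length - i') - rm.length := by
          have h := congrArg List.length hpre
          simp [List.length_drop] at h
          omega
        have hdropI : L.drop (i' + ((L.length - i') - rm.length)) = rm := by
          have h1 : (L.drop i').drop pre.length = rm := by
            rw [← hpre]; exact List.drop_left
          rw [List.drop_drop] at h1
          rw [← hprelen]
          exact h1
        have htree := IH i' rm (by omega) hrm1 fa' fb' (by omega) (by omega)
        have hA2 : (pvTrA fa' (L.drop i')).2 = (((L.length - i') - rm.length : Nat) : Int) := by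
          rw [htree.2, List.length_drop]
        obtain ⟨S', N', hN1', hN2', hN3', hst'⟩ :=
          ihk (i' + ((L.length - i') - rm.length)) r' (by omega) (by omega)
            (by rw [hdropI]; exact hrmk)
        refine ⟨(pvTrA fa' (L.drop i')).1 + S', ((L.length - i') - rm.length) + N',
          by omega, by omega, by omega, ?_⟩
        intro sA sB
        have hdrops : (L.drop i).drop (i' - i) = L.drop i' := by
          rw [List.drop_drop]; congr 1; omega
        constructor
        · rw [Function.iterate_succ_apply]
          have hga : pvGA fa' (L.drop i) (sA, ((i' - (i + 2) : Nat) : Int))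
              = (sA + (pvTrA fa' (L.drop i')).1,
                 ((i' + ((L.length - i') - rm.length) - (i + 2) : Nat) : Int)) := by
            simp only [pvGA]
            have harg : (2 + ((i' - (i + 2) : Nat) : Int)) = ((i' - i : Nat) : Int) := by omega
            rw [harg, PySem.List.slice_from _ (Int.natCast_nonneg (i' - i)),
              Int.toNat_natCast, hdrops]
            simp only [Prod.mk.injEq]
            exact ⟨by trivial, by rw [hA2]; omega⟩
          rw [hga]
          rw [(hst' (sA + (pvTrA fa' (L.drop i')).1) 0).1]
          simp only [Prod.mk.injEq]
          exact ⟨by ring, by congr 1; omega⟩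
        · rw [Function.iterate_succ_apply]
          have hgb : pvGB fb' L (sB, (i' : Int))
              = (sB + (pvTrA fa' (L.drop i')).1,
                 ((i' + ((L.length - i') - rm.length) : Nat) : Int)) := by
            simp only [pvGB]
            rw [htree.1]
            simp only [Prod.mk.injEq]
            exact ⟨by trivial, by rw [hA2]; omega⟩
          rw [hgb]
          rw [(hst' 0 (sB + (pvTrA fa' (L.drop i')).1)).2]
          simp only [Prod.mk.injEq]
          exact ⟨by ring, by congr 1; omega⟩
    -- unfold one step of each port
    have hBstep : pvTrB (fb' + 1) L (i : Int) =
        (let st := (pvGB fb' L)^[c.toNat] (0, (i : Int) + 2)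
         (st.1 + (PySem.List.slice L (some st.2) (some (st.2 + m))).sum, st.2 + m)) := by
      simp only [pvTrB, hB0, hB1, pvFoldB]
    rw [← hl]
    by_cases hc : c = 0
    · -- leaf: no children, metadata right after the header
      have hr1' : r1 = rest := by
        rw [hc] at hr1
        simp only [Int.toNat_zero, pvChk_zero, Option.some.injEq] at hr1
        exact hr1.symm
      have hAstep : pvTrA (fa' + 1) (L.drop i) =
          ((PySem.List.slice (L.drop i) (some 2) (some (2 + m))).sum, 2 + m) := by
        simp only [pvTrA, hA0, hA1, hc, if_pos]
      have hsliceA : PySem.List.slice (L.drop i) (some 2) (some (2 + m)) = rest.take m.toNat := by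
        rw [hl, PySem.List.slice_toNat _ (show (0:Int) ≤ 2 by norm_num)
          (show (0:Int) ≤ 2 + m from by omega)]
        have e1 : ((2 : Int)).toNat = 2 := rfl
        have e2 : ((2 : Int) + m).toNat - (2 : Int).toNat = m.toNat := by omega
        rw [e2, e1]
        simp only [List.drop_succ_cons, List.drop_zero]
      have hsliceB : PySem.List.slice L (some ((i : Int) + 2)) (some ((i : Int) + 2 + m))
          = rest.take m.toNat := by
        rw [PySem.List.slice_toNat _ (show (0:Int) ≤ (i : Int) + 2 by omega)
          (show (0:Int) ≤ (i : Int) + 2 + m by omega)]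
        have e1 : ((i : Int) + 2).toNat = i + 2 := by omega
        have e2 : ((i : Int) + 2 + m).toNat - ((i : Int) + 2).toNat = m.toNat := by omega
        rw [e2, e1, hrest]
      rw [hAstep, hBstep, hc]
      simp only [Int.toNat_zero, Function.iterate_zero, id_eq, hsliceB, hsliceA]
      refine ⟨by simp only [Prod.mk.injEq]; exact ⟨by ring, by ring⟩, ?_⟩
      rw [hrR, hr1']
      simp only [List.length_drop]
      have hm' : m.toNat ≤ rest.length := hr1' ▸ hm
      omega
    · -- internal node
      have hAstep : pvTrA (fa' + 1) (L.drop i) =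
          (let st := (pvGA fa' (L.drop i))^[c.toNat] (0, 0)
           (st.1 + (PySem.List.slice (L.drop i) (some (2 + st.2))
                      (some (2 + st.2 + m))).sum, 2 + st.2 + m)) := by
        simp only [pvTrA, hA0, hA1, if_neg hc, pvFoldA]
      obtain ⟨S, N, hN1, hN2, hN3, hst⟩ := loop c.toNat (i + 2) r1 (Nat.le_refl _) hiL
        (by rw [hrest]; exact hr1)
      have hstA : (pvGA fa' (L.drop i))^[c.toNat] (0, 0) = (S, (N : Int)) := by
        have h := (hst 0 0).1
        simpa using h
      have hstB : (pvGB fb' L)^[c.toNat] (0, (i : Int) + 2) = (S, ((i + 2 + N : Nat) : Int)) := by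
        have h := (hst 0 0).2
        have e : ((i + 2 : Nat) : Int) = (i : Int) + 2 := by push_cast; ring
        rw [e] at h
        simpa using h
      have hsliceA : PySem.List.slice (L.drop i) (some (2 + (N : Int)))
          (some (2 + (N : Int) + m)) = (L.drop (i + 2 + N)).take m.toNat := by
        rw [PySem.List.slice_toNat _ (show (0:Int) ≤ 2 + (N : Int) by omega)
          (show (0:Int) ≤ 2 + (N : Int) + m by omega)]
        have e1 : ((2 : Int) + (N : Int)).toNat = 2 + N := by omega
        have e2 : ((2 : Int) + (N : Int) + m).toNat - ((2 : Int) + (N : Int)).toNat = m.toNat := by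
          omega
        rw [e2, e1, List.drop_drop]
        have e3 : i + (2 + N) = i + 2 + N := by omega
        rw [e3]
      have hsliceB : PySem.List.slice L (some ((i + 2 + N : Nat) : Int))
          (some (((i + 2 + N : Nat) : Int) + m)) = (L.drop (i + 2 + N)).take m.toNat := by
        rw [PySem.List.slice_toNat _ (Int.natCast_nonneg (i + 2 + N))
          (show (0:Int) ≤ ((i + 2 + N : Nat) : Int) + m by omega)]
        have e2 : (((i + 2 + N : Nat) : Int) + m).toNat - ((i + 2 + N : Nat) : Int).toNat
            = m.toNat := by omega
        rw [e2, Int.toNat_natCast]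
      rw [hAstep, hBstep]
      simp only [hstA, hstB, hsliceA, hsliceB]
      have hr1len' : r1.length ≤ rest.length := hr1len
      constructor
      · simp only [Prod.mk.injEq]
        constructor
        · trivial
        · push_cast
          ring
      · rw [hrR]
        simp only [List.length_drop]
        have hmr : m.toNat ≤ r1.length := hm
        omega

-- equation lemmas for the machine
lemma pvMach_succ_cons (f : Nat) (L : List Int) (i total c m : Int) (s : List (Int × Int)) :
    pvMach (f + 1) L i total ((c, m) :: s) =
      if c ≤ 0 then
        pvMach f L (i + m) (total + (PySem.List.slice L (some i) (some (i + m))).sum) s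
      else
        pvMach f L (i + 2) total
          ((PySem.List.pyGetD L i 0, PySem.List.pyGetD L (i + 1) 0) :: (c - 1, m) :: s) := rfl

lemma pvMach_nil (f : Nat) (L : List Int) (i total : Int) :
    pvMach f L i total [] = (total, i) := by
  cases f <;> rfl

-- the machine processes one well-formed tree at position i exactly like pvTrA on the suffix:
-- it takes some t ≤ (consumed length) loop iterations, adds the tree's score, moves the
-- position past the tree, and decrements the top frame's child counter.
lemma pvMachTree (L : List Int) : ∀ (s i : Nat) (r : List Int),
    L.length - i ≤ s → pvChk 1 (L.drop i) = some r →
    ∀ (fa : Nat), L.length - i < fa →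
    ∃ t : Nat, t ≤ L.length - r.length - i ∧
      ∀ (f : Nat) (total cc mm : Int) (st : List (Int × Int)), 0 < cc →
        pvMach (f + t) L ((i : Nat) : Int) total ((cc, mm) :: st)
          = pvMach f L ((L.length - r.length : Nat) : Int)
              (total + (pvTrA fa (L.drop i)).1) ((cc - 1, mm) :: st) := by
  intro s
  induction s with
  | zero =>
    intro i r hs hchk fa hfa
    exfalso
    have h0 : L.drop i = [] := by
      have := List.length_drop (l := L) (i := i)
      exact List.eq_nil_of_length_eq_zero (by omega)
    rw [h0, pvChk_succ_nil] at hchk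
    simp at hchk
  | succ s IH =>
    intro i r hs hchk fa hfa
    rcases hl : L.drop i with _ | ⟨c, tail⟩
    · rw [hl, pvChk_succ_nil] at hchk; simp at hchk
    rcases htl : tail with _ | ⟨m, rest⟩
    · rw [hl, htl, pvChk_succ_single] at hchk; simp at hchk
    subst htl
    rw [hl, pvChk_succ_cons] at hchk
    by_cases hcm : 0 ≤ m
    swap
    · rw [if_neg hcm] at hchk; simp at hchk
    rw [if_pos hcm] at hchk
    rcases hr1 : pvChk c.toNat rest with _ | r1
    · rw [hr1] at hchk; simp at hchk
    rw [hr1, Option.bind_some] at hchk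
    by_cases hm : m.toNat ≤ r1.length
    swap
    · rw [if_neg hm] at hchk; simp at hchk
    rw [if_pos hm, pvChk_zero] at hchk
    have hrR : r = r1.drop m.toNat := by simpa using hchk.symm
    have hrlen : r.length = r1.length - m.toNat := by rw [hrR, List.length_drop]
    have hr1len : r1.length ≤ rest.length := pvChk_length hr1
    have hlenl : (L.drop i).length = L.length - i := List.length_drop
    have hlen2 : L.length - i = rest.length + 2 := by
      rw [← hlenl, hl]; simp
    have hiL : i + 2 ≤ L.length := by
      rcases Nat.le_total i L.length with h | h
      · omega
      · exfalso; rw [List.drop_eq_nil_of_le h] at hl; simp at hl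
    have hrest : L.drop (i + 2) = rest := by
      have h2 := congrArg (List.drop 2) hl
      rw [List.drop_drop] at h2
      simpa [Nat.add_comm] using h2
    obtain ⟨fa', rfl⟩ : ∃ fa', fa = fa' + 1 := ⟨fa - 1, by omega⟩
    have hA0 : PySem.List.pyGetD (L.drop i) 0 0 = c := by rw [hl]; exact pvGetD_zero_cons' _ _ _ _
    have hA1 : PySem.List.pyGetD (L.drop i) 1 0 = m := by rw [hl]; exact pvGetD_one_cons _ _ _ _
    have hB0 : PySem.List.pyGetD L (i : Int) 0 = c := by
      refine pvGetD_nat L i c 0 ?_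
      have h0 : L[i + 0]? = some c := by rw [← List.getElem?_drop, hl]; rfl
      simpa using h0
    have hB1 : PySem.List.pyGetD L ((i : Int) + 1) 0 = m := by
      have hcast : ((i : Int) + 1) = ((i + 1 : Nat) : Int) := by push_cast; ring
      rw [hcast]
      refine pvGetD_nat L (i + 1) m 0 ?_
      rw [← List.getElem?_drop, hl]; rfl
    -- children invariant: k trees at pos are k iterations of A's fold and some machine steps
    have inner : ∀ (k pos : Nat) (rem : List Int), i + 2 ≤ pos → pos ≤ L.length →
        pvChk k (L.drop pos) = some rem →
        ∃ (S : Int) (N t : Nat),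
          pos + N ≤ L.length ∧ N = (L.length - pos) - rem.length ∧
          rem.length ≤ L.length - pos ∧ t ≤ N ∧
          (∀ sA : Int, (pvGA fa' (L.drop i))^[k] (sA, ((pos - (i + 2) : Nat) : Int))
              = (sA + S, ((pos + N - (i + 2) : Nat) : Int))) ∧
          (∀ (f : Nat) (total m' : Int) (st' : List (Int × Int)),
              pvMach (f + t) L ((pos : Nat) : Int) total ((((k : Nat) : Int), m') :: st')
                = pvMach f L ((pos + N : Nat) : Int) (total + S) (((0 : Int), m') :: st')) := by
      intro k
      induction k with
      | zero =>
        intro pos rem hge hle hc0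
        rw [pvChk_zero] at hc0
        obtain rfl : L.drop pos = rem := Option.some.inj hc0
        refine ⟨0, 0, 0, by omega, by simp [List.length_drop], by simp [List.length_drop], by omega, ?_, ?_⟩
        · intro sA; simp
        · intro f total m' st'; simp
      | succ k ihk =>
        intro pos rem hge hle hck
        obtain ⟨rm, hrm1, hrmk⟩ := pvChk_succ_split hck
        have hrmlen : rm.length ≤ L.length - pos := by
          have h := pvChk_length hrm1
          rw [List.length_drop] at h
          exact h
        obtain ⟨pre, hpre⟩ := pvChk_suffix hrm1
        have hprelen : pre.length = (L.length - pos) - rm.length := by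
          have h := congrArg List.length hpre
          simp [List.length_drop] at h
          omega
        have hdropI : L.drop (pos + ((L.length - pos) - rm.length)) = rm := by
          have h1 : (L.drop pos).drop pre.length = rm := by
            rw [← hpre]; exact List.drop_left
          rw [List.drop_drop] at h1
          rw [← hprelen]
          exact h1
        obtain ⟨t1, ht1, hrun1⟩ := IH pos rm (by omega) hrm1 (fa' + 1) (by omega)
        have hA2 : (pvTrA (fa' + 1) (L.drop pos)).2
            = (((L.length - pos) - rm.length : Nat) : Int) := by
          have h := (pvMain L L.length pos rm (by omega) hrm1 (fa' + 1) (fa' + 1)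
            (by omega) (by omega)).2
          rw [List.length_drop] at h
          exact h
        obtain ⟨S2, N2, t2, hN2a, hN2b, hN2c, ht2, hitr2, hrun2⟩ :=
          ihk (pos + ((L.length - pos) - rm.length)) rem (by omega) (by omega)
            (by rw [hdropI]; exact hrmk)
        refine ⟨(pvTrA (fa' + 1) (L.drop pos)).1 + S2, ((L.length - pos) - rm.length) + N2,
          t1 + t2, by omega, by omega, by omega, by omega, ?_, ?_⟩
        · intro sA
          rw [Function.iterate_succ_apply]
          have hdrops : (L.drop i).drop (pos - i) = L.drop pos := by
            rw [List.drop_drop]; congr 1; omega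
          have hga : pvGA fa' (L.drop i) (sA, ((pos - (i + 2) : Nat) : Int))
              = (sA + (pvTrA (fa' + 1) (L.drop pos)).1,
                 ((pos + ((L.length - pos) - rm.length) - (i + 2) : Nat) : Int)) := by
            simp only [pvGA]
            have harg : (2 + ((pos - (i + 2) : Nat) : Int)) = ((pos - i : Nat) : Int) := by omega
            rw [harg, PySem.List.slice_from _ (Int.natCast_nonneg (pos - i)),
              Int.toNat_natCast, hdrops]
            -- the child call's fuel: fa' and fa' + 1 agree here, via pvMain at both fuels
            have hfuel : pvTrA fa' (L.drop pos) = pvTrA (fa' + 1) (L.drop pos) := by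
              have h1 := pvMain L L.length pos rm (by omega) hrm1 fa' (fa' + 1)
                (by omega) (by omega)
              have h2 := pvMain L L.length pos rm (by omega) hrm1 (fa' + 1) (fa' + 1)
                (by omega) (by omega)
              have := h1.1.symm.trans h2.1
              have hfst : (pvTrA fa' (L.drop pos)).1 = (pvTrA (fa' + 1) (L.drop pos)).1 := by
                have := congrArg Prod.fst this
                simpa using this
              have hsnd : (pvTrA fa' (L.drop pos)).2 = (pvTrA (fa' + 1) (L.drop pos)).2 := by
                rw [h1.2, h2.2]
              exact Prod.ext hfst hsnd
            rw [hfuel]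
            simp only [Prod.mk.injEq]
            exact ⟨by trivial, by rw [hA2]; omega⟩
          rw [hga, hitr2 (sA + (pvTrA (fa' + 1) (L.drop pos)).1)]
          simp only [Prod.mk.injEq]
          exact ⟨by ring, by congr 1; omega⟩
        · intro f total m' st'
          rw [show f + (t1 + t2) = (f + t2) + t1 from by omega]
          rw [hrun1 (f + t2) total (((k + 1 : Nat) : Int)) m' st'
            (by exact_mod_cast Nat.succ_pos k)]
          rw [show ((k + 1 : Nat) : Int) - 1 = ((k : Nat) : Int) from by push_cast; ring]
          rw [show L.length - rm.length = pos + ((L.length - pos) - rm.length) from by omega]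
          rw [hrun2 f (total + (pvTrA (fa' + 1) (L.drop pos)).1) m' st']
          rw [show pos + (((L.length - pos) - rm.length) + N2)
                = pos + ((L.length - pos) - rm.length) + N2 from by omega]
          rw [show total + ((pvTrA (fa' + 1) (L.drop pos)).1 + S2)
                = total + (pvTrA (fa' + 1) (L.drop pos)).1 + S2 from by ring]
    rw [← hl]
    by_cases hc : c = 0
    · -- leaf: push the (0, m) frame, then pop it summing the metadata
      have hr1' : r1 = rest := by
        rw [hc] at hr1
        simp only [Int.toNat_zero, pvChk_zero, Option.some.injEq] at hr1
        exact hr1.symm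
      have hAstep : pvTrA (fa' + 1) (L.drop i) =
          ((PySem.List.slice (L.drop i) (some 2) (some (2 + m))).sum, 2 + m) := by
        simp only [pvTrA, hA0, hA1, hc, if_pos]
      have hsliceA : PySem.List.slice (L.drop i) (some 2) (some (2 + m)) = rest.take m.toNat := by
        rw [hl, PySem.List.slice_toNat _ (show (0:Int) ≤ 2 by norm_num)
          (show (0:Int) ≤ 2 + m from by omega)]
        have e1 : ((2 : Int)).toNat = 2 := rfl
        have e2 : ((2 : Int) + m).toNat - (2 : Int).toNat = m.toNat := by omega
        rw [e2, e1]
        simp only [List.drop_succ_cons, List.drop_zero]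
      have hsliceB : PySem.List.slice L (some ((i : Int) + 2)) (some ((i : Int) + 2 + m))
          = rest.take m.toNat := by
        rw [PySem.List.slice_toNat _ (show (0:Int) ≤ (i : Int) + 2 by omega)
          (show (0:Int) ≤ (i : Int) + 2 + m by omega)]
        have e1 : ((i : Int) + 2).toNat = i + 2 := by omega
        have e2 : ((i : Int) + 2 + m).toNat - ((i : Int) + 2).toNat = m.toNat := by omega
        rw [e2, e1, hrest]
      have hm' : m.toNat ≤ rest.length := hr1' ▸ hm
      refine ⟨2, by omega, ?_⟩
      intro f total cc mm st hcc
      rw [show f + 2 = (f + 1) + 1 from rfl]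
      rw [pvMach_succ_cons, if_neg (by omega : ¬ cc ≤ 0), hB0, hB1, hc]
      rw [pvMach_succ_cons, if_pos (le_refl (0 : Int))]
      rw [hsliceB]
      rw [show (i : Int) + 2 + m = ((L.length - r.length : Nat) : Int) from by
        rw [hrlen, hr1']; omega]
      rw [hAstep, hsliceA]
    · obtain hlt | hgt := lt_or_gt_of_ne hc
      -- a negative child count: A's range() loop is empty, B pops the frame at once
      · have hct : c.toNat = 0 := by omega
        have hr1' : r1 = rest := by
          rw [hct, pvChk_zero] at hr1
          exact (Option.some.inj hr1).symm
        have hAstep : pvTrA (fa' + 1) (L.drop i) =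
            ((PySem.List.slice (L.drop i) (some 2) (some (2 + m))).sum, 2 + m) := by
          simp only [pvTrA, hA0, hA1, if_neg hc, pvFoldA, hct, Function.iterate_zero, id_eq]
          norm_num
        have hsliceA : PySem.List.slice (L.drop i) (some 2) (some (2 + m))
            = rest.take m.toNat := by
          rw [hl, PySem.List.slice_toNat _ (show (0:Int) ≤ 2 by norm_num)
            (show (0:Int) ≤ 2 + m from by omega)]
          have e1 : ((2 : Int)).toNat = 2 := rfl
          have e2 : ((2 : Int) + m).toNat - (2 : Int).toNat = m.toNat := by omega
          rw [e2, e1]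
          simp only [List.drop_succ_cons, List.drop_zero]
        have hsliceB : PySem.List.slice L (some ((i : Int) + 2)) (some ((i : Int) + 2 + m))
            = rest.take m.toNat := by
          rw [PySem.List.slice_toNat _ (show (0:Int) ≤ (i : Int) + 2 by omega)
            (show (0:Int) ≤ (i : Int) + 2 + m by omega)]
          have e1 : ((i : Int) + 2).toNat = i + 2 := by omega
          have e2 : ((i : Int) + 2 + m).toNat - ((i : Int) + 2).toNat = m.toNat := by omega
          rw [e2, e1, hrest]
        have hm' : m.toNat ≤ rest.length := hr1' ▸ hm
        refine ⟨2, by omega, ?_⟩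
        intro f total cc mm st hcc
        rw [show f + 2 = (f + 1) + 1 from rfl]
        rw [pvMach_succ_cons, if_neg (by omega : ¬ cc ≤ 0), hB0, hB1]
        rw [pvMach_succ_cons, if_pos (le_of_lt hlt)]
        rw [hsliceB]
        rw [show (i : Int) + 2 + m = ((L.length - r.length : Nat) : Int) from by
          rw [hrlen, hr1']; omega]
        rw [hAstep, hsliceA]
      -- a positive child count: push the (c, m) frame, run the children, pop on the metadata
      · obtain ⟨S, N, tc, hN1, hN2, hN3, htc, hitr, hmrun⟩ :=
          inner c.toNat (i + 2) r1 (Nat.le_refl _) hiL (by rw [hrest]; exact hr1)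
        have hAstep : pvTrA (fa' + 1) (L.drop i) =
            (let st := (pvGA fa' (L.drop i))^[c.toNat] (0, 0)
             (st.1 + (PySem.List.slice (L.drop i) (some (2 + st.2))
                        (some (2 + st.2 + m))).sum, 2 + st.2 + m)) := by
          simp only [pvTrA, hA0, hA1, if_neg hc, pvFoldA]
        have hstA : (pvGA fa' (L.drop i))^[c.toNat] (0, 0) = (S, (N : Int)) := by
          have h := hitr 0
          rw [show (i + 2) - (i + 2) = 0 from by omega,
            show (i + 2) + N - (i + 2) = N from by omega] at h
          simpa using h
        have hsliceA : PySem.List.slice (L.drop i) (some (2 + (N : Int)))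
            (some (2 + (N : Int) + m)) = (L.drop (i + 2 + N)).take m.toNat := by
          rw [PySem.List.slice_toNat _ (show (0:Int) ≤ 2 + (N : Int) by omega)
            (show (0:Int) ≤ 2 + (N : Int) + m by omega)]
          have e1 : ((2 : Int) + (N : Int)).toNat = 2 + N := by omega
          have e2 : ((2 : Int) + (N : Int) + m).toNat - ((2 : Int) + (N : Int)).toNat = m.toNat := by
            omega
          rw [e2, e1, List.drop_drop]
          have e3 : i + (2 + N) = i + 2 + N := by omega
          rw [e3]
        have hsliceB : PySem.List.slice L (some ((i + 2 + N : Nat) : Int))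
            (some (((i + 2 + N : Nat) : Int) + m)) = (L.drop (i + 2 + N)).take m.toNat := by
          rw [PySem.List.slice_toNat _ (Int.natCast_nonneg (i + 2 + N))
            (show (0:Int) ≤ ((i + 2 + N : Nat) : Int) + m by omega)]
          have e2 : (((i + 2 + N : Nat) : Int) + m).toNat - ((i + 2 + N : Nat) : Int).toNat
              = m.toNat := by omega
          rw [e2, Int.toNat_natCast]
        refine ⟨tc + 2, by omega, ?_⟩
        intro f total cc mm st hcc
        rw [show f + (tc + 2) = ((f + 1) + tc) + 1 from by omega]
        rw [pvMach_succ_cons, if_neg (by omega : ¬ cc ≤ 0), hB0, hB1]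
        rw [show (i : Int) + 2 = ((i + 2 : Nat) : Int) from by push_cast; ring]
        rw [show c = ((c.toNat : Nat) : Int) from (Int.toNat_of_nonneg (le_of_lt hgt)).symm]
        rw [hmrun (f + 1) total m ((cc - 1, mm) :: st)]
        rw [pvMach_succ_cons, if_pos (le_refl (0 : Int))]
        rw [hAstep]
        simp only [hstA, hsliceA]
        rw [hsliceB]
        rw [show ((i + 2 + N : Nat) : Int) + m = ((L.length - r.length : Nat) : Int) from by
          rw [hrlen]; omega]
        rw [show total + S + ((L.drop (i + 2 + N)).take m.toNat).sum
              = total + (S + ((L.drop (i + 2 + N)).take m.toNat).sum) from by ring]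


-- a slice with equal endpoints is empty (any Int endpoint, as in Python)
lemma pvSliceSelf (l : List Int) (a : Int) : PySem.List.slice l (some a) (some a) = [] := by
  apply List.eq_nil_of_length_eq_zero
  rw [PySem.List.length_slice]
  omega

-- the root's children: k well-formed trees starting at position pos ≥ 2 are k iterations of
-- A's fold over the whole list and some machine steps (standalone version of the invariant
-- inside pvMachTree, used for the root node, whose own metadata count is unconstrained)
lemma pvKids (L : List Int) : ∀ (k pos : Nat) (rem : List Int), 2 ≤ pos → pos ≤ L.length →
    pvChk k (L.drop pos) = some rem →
    ∀ (fa' : Nat), L.length ≤ fa' + 1 →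
    ∃ (S : Int) (N t : Nat),
      pos + N ≤ L.length ∧ N = (L.length - pos) - rem.length ∧
      rem.length ≤ L.length - pos ∧ t ≤ N ∧
      (∀ sA : Int, (pvGA fa' L)^[k] (sA, ((pos - 2 : Nat) : Int))
          = (sA + S, ((pos + N - 2 : Nat) : Int))) ∧
      (∀ (f : Nat) (total m' : Int) (st' : List (Int × Int)),
          pvMach (f + t) L ((pos : Nat) : Int) total ((((k : Nat) : Int), m') :: st')
            = pvMach f L ((pos + N : Nat) : Int) (total + S) (((0 : Int), m') :: st')) := by
  intro k
  induction k with
  | zero =>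
    intro pos rem hge hle hc0 fa' hfa
    rw [pvChk_zero] at hc0
    obtain rfl : L.drop pos = rem := Option.some.inj hc0
    refine ⟨0, 0, 0, by omega, by simp [List.length_drop], by simp [List.length_drop],
      by omega, ?_, ?_⟩
    · intro sA; simp
    · intro f total m' st'; simp
  | succ k ihk =>
    intro pos rem hge hle hck fa' hfa
    obtain ⟨rm, hrm1, hrmk⟩ := pvChk_succ_split hck
    have hrmlen : rm.length ≤ L.length - pos := by
      have h := pvChk_length hrm1
      rw [List.length_drop] at h
      exact h
    obtain ⟨pre, hpre⟩ := pvChk_suffix hrm1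
    have hprelen : pre.length = (L.length - pos) - rm.length := by
      have h := congrArg List.length hpre
      simp [List.length_drop] at h
      omega
    have hdropI : L.drop (pos + ((L.length - pos) - rm.length)) = rm := by
      have h1 : (L.drop pos).drop pre.length = rm := by
        rw [← hpre]; exact List.drop_left
      rw [List.drop_drop] at h1
      rw [← hprelen]
      exact h1
    obtain ⟨t1, ht1, hrun1⟩ := pvMachTree L L.length pos rm (by omega) hrm1 (fa' + 1)
      (by omega)
    have hA2 : (pvTrA (fa' + 1) (L.drop pos)).2
        = (((L.length - pos) - rm.length : Nat) : Int) := by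
      have h := (pvMain L L.length pos rm (by omega) hrm1 (fa' + 1) (fa' + 1)
        (by omega) (by omega)).2
      rw [List.length_drop] at h
      exact h
    obtain ⟨S2, N2, t2, hN2a, hN2b, hN2c, ht2, hitr2, hrun2⟩ :=
      ihk (pos + ((L.length - pos) - rm.length)) rem (by omega) (by omega)
        (by rw [hdropI]; exact hrmk) fa' hfa
    refine ⟨(pvTrA (fa' + 1) (L.drop pos)).1 + S2, ((L.length - pos) - rm.length) + N2,
      t1 + t2, by omega, by omega, by omega, by omega, ?_, ?_⟩
    · intro sA
      rw [Function.iterate_succ_apply]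
      have hga : pvGA fa' L (sA, ((pos - 2 : Nat) : Int))
          = (sA + (pvTrA (fa' + 1) (L.drop pos)).1,
             ((pos + ((L.length - pos) - rm.length) - 2 : Nat) : Int)) := by
        simp only [pvGA]
        have harg : (2 + ((pos - 2 : Nat) : Int)) = ((pos : Nat) : Int) := by omega
        rw [harg, PySem.List.slice_from _ (Int.natCast_nonneg pos), Int.toNat_natCast]
        have hfuel : pvTrA fa' (L.drop pos) = pvTrA (fa' + 1) (L.drop pos) := by
          have h1 := pvMain L L.length pos rm (by omega) hrm1 fa' (fa' + 1)
            (by omega) (by omega)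
          have h2 := pvMain L L.length pos rm (by omega) hrm1 (fa' + 1) (fa' + 1)
            (by omega) (by omega)
          have h3 := h1.1.symm.trans h2.1
          have hfst : (pvTrA fa' (L.drop pos)).1 = (pvTrA (fa' + 1) (L.drop pos)).1 := by
            have := congrArg Prod.fst h3
            simpa using this
          have hsnd : (pvTrA fa' (L.drop pos)).2 = (pvTrA (fa' + 1) (L.drop pos)).2 := by
            rw [h1.2, h2.2]
          exact Prod.ext hfst hsnd
        rw [hfuel]
        simp only [Prod.mk.injEq]
        exact ⟨by trivial, by rw [hA2]; omega⟩
      rw [hga, hitr2 (sA + (pvTrA (fa' + 1) (L.drop pos)).1)]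
      simp only [Prod.mk.injEq]
      exact ⟨by ring, by congr 1; omega⟩
    · intro f total m' st'
      rw [show f + (t1 + t2) = (f + t2) + t1 from by omega]
      rw [hrun1 (f + t2) total (((k + 1 : Nat) : Int)) m' st'
        (by exact_mod_cast Nat.succ_pos k)]
      rw [show ((k + 1 : Nat) : Int) - 1 = ((k : Nat) : Int) from by push_cast; ring]
      rw [show L.length - rm.length = pos + ((L.length - pos) - rm.length) from by omega]
      rw [hrun2 f (total + (pvTrA (fa' + 1) (L.drop pos)).1) m' st']
      rw [show pos + (((L.length - pos) - rm.length) + N2)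
            = pos + ((L.length - pos) - rm.length) + N2 from by omega]
      rw [show total + ((pvTrA (fa' + 1) (L.drop pos)).1 + S2)
            = total + (pvTrA (fa' + 1) (L.drop pos)).1 + S2 from by ring]

-- ===== VERDICT (by name: the statement is the Claim_ definition above) =====
theorem traverse1_spec : Claim_equal_traverse1 := by
  intro l _dom hpre
  obtain ⟨hlen, hch⟩ := hpre
  rcases l with _ | ⟨c, l2⟩
  · simp at hlen
  rcases l2 with _ | ⟨m, rest⟩
  · simp at hlen
  rw [show ((c :: m :: rest : List Int).getD 0 0) = c from rfl,
    show (c :: m :: rest : List Int).drop 2 = rest from rfl] at hch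
  obtain ⟨r, hr⟩ : ∃ r, pvChk c.toNat rest = some r :=
    Option.isSome_iff_exists.mp (pre_chk hch)
  unfold Spec_traverse1 traverse1 traverse1_alt
  by_cases hc : c ≤ 0
  · -- root with no children (c ≤ 0): both sides compute sum(l[2:2+l[1]]) and 2+l[1]
    have hA : pvTrA ((c :: m :: rest : List Int).length + 1) (c :: m :: rest)
        = ((PySem.List.slice (c :: m :: rest : List Int) (some 2) (some (2 + m))).sum,
           2 + m) := by
      by_cases hc0 : c = 0
      · simp only [pvTrA, pvGetD_zero_cons', pvGetD_one_cons, hc0]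
        simp
      · have hct : c.toNat = 0 := by omega
        simp only [pvTrA, pvGetD_zero_cons', pvGetD_one_cons, if_neg hc0, pvFoldA, hct,
          Function.iterate_zero, id_eq]
        norm_num
    rw [hA]
    rw [show 2 * (c :: m :: rest : List Int).length + 3
        = ((2 * (c :: m :: rest : List Int).length + 2) + 1) from by omega]
    rw [pvMach_succ_cons, if_neg (by norm_num : ¬ (1 : Int) ≤ 0), pvGetD_zero_cons']
    rw [show (0 : Int) + 1 = 1 from by norm_num, pvGetD_one_cons]
    rw [show 2 * (c :: m :: rest : List Int).length + 2
        = ((2 * (c :: m :: rest : List Int).length + 1) + 1) from by omega]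
    rw [pvMach_succ_cons, if_pos hc]
    rw [show (1 : Int) - 1 = 0 from by norm_num]
    rw [show 2 * (c :: m :: rest : List Int).length + 1
        = ((2 * (c :: m :: rest : List Int).length) + 1) from rfl]
    rw [pvMach_succ_cons, if_pos (le_refl (0 : Int))]
    rw [pvMach_nil]
    simp [pvSliceSelf]
  · -- root with children (c > 0): run them with pvKids, then pop the root frame
    replace hc : 0 < c := by omega
    have hLlen : (c :: m :: rest : List Int).length = rest.length + 2 := by simp
    obtain ⟨S, N, t, hN1, hN2, hN3, ht, hitr, hmrun⟩ :=
      pvKids (c :: m :: rest) c.toNat 2 r (le_refl 2) (by omega)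
        (by rw [show (c :: m :: rest : List Int).drop 2 = rest from rfl]; exact hr)
        ((c :: m :: rest : List Int).length) (by omega)
    have hstA : (pvGA ((c :: m :: rest : List Int).length) (c :: m :: rest))^[c.toNat] (0, 0)
        = (S, (N : Int)) := by
      have h := hitr 0
      rw [show (2 : Nat) - 2 = 0 from rfl, show 2 + N - 2 = N from by omega] at h
      simpa using h
    have hAstep : pvTrA ((c :: m :: rest : List Int).length + 1) (c :: m :: rest) =
        (let st := (pvGA ((c :: m :: rest : List Int).length) (c :: m :: rest))^[c.toNat] (0, 0)
         (st.1 + (PySem.List.slice (c :: m :: rest) (some (2 + st.2))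
                    (some (2 + st.2 + m))).sum, 2 + st.2 + m)) := by
      simp only [pvTrA, pvGetD_zero_cons', pvGetD_one_cons, if_neg (by omega : ¬ c = 0),
        pvFoldA]
    rw [hAstep]
    simp only [hstA]
    rw [show 2 * (c :: m :: rest : List Int).length + 3
        = ((2 * (c :: m :: rest : List Int).length + 2) + 1) from by omega]
    rw [pvMach_succ_cons, if_neg (by omega : ¬ (1 : Int) ≤ 0), pvGetD_zero_cons']
    rw [show (0 : Int) + 1 = 1 from by norm_num, pvGetD_one_cons]
    rw [show (1 : Int) - 1 = 0 from by norm_num]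
    rw [show (0 : Int) + 2 = ((2 : Nat) : Int) from by norm_num]
    rw [show ((c, m) :: ((0 : Int), (0 : Int)) :: ([] : List (Int × Int)))
        = ((((c.toNat : Nat) : Int), m) :: ((0 : Int), (0 : Int)) :: []) from by
      rw [Int.toNat_of_nonneg (le_of_lt hc)]]
    rw [show 2 * (c :: m :: rest : List Int).length + 2
        = ((2 * (c :: m :: rest : List Int).length + 2 - t) + t) from by omega]
    rw [hmrun (2 * (c :: m :: rest : List Int).length + 2 - t) 0 m [((0 : Int), (0 : Int))]]
    rw [show 2 * (c :: m :: rest : List Int).length + 2 - t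
        = ((2 * (c :: m :: rest : List Int).length + 1 - t) + 1) from by omega]
    rw [pvMach_succ_cons, if_pos (le_refl (0 : Int))]
    rw [show 2 * (c :: m :: rest : List Int).length + 1 - t
        = ((2 * (c :: m :: rest : List Int).length - t) + 1) from by omega]
    rw [pvMach_succ_cons, if_pos (le_refl (0 : Int))]
    rw [pvMach_nil]
    rw [show ((2 + N : Nat) : Int) = 2 + (N : Int) from by push_cast; ring]
    rw [show 2 + (N : Int) + m + 0 = 2 + (N : Int) + m from by omega]
    rw [pvSliceSelf]
    simp only [Prod.mk.injEq, List.sum_nil]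
    constructor
    · ring
    · trivial
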